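-- pv_equiv track=rewrite | github.com/pdromnt/mario-and-luigi | tools/extract_worlds.py | format_bytes_as_pascal
-- ===== SOURCE A (Python) =====
-- def format_bytes_as_pascal(name, data_bytes):
--     """Format a byte array as a Pascal typed constant."""
--     if not data_bytes:
--         return f"  {name}_Data: array[0..0] of Byte = (0);\n"
--
--     n = len(data_bytes)
--     lines = []
--     lines.append(f"  {name}_Data: array[0..{n - 1}] of Byte = (")
--
--     # Format 16 bytes per line
--     BYTES_PER_LINE = 16
--     for start in range(0, n, BYTES_PER_LINE):
--         chunk = data_bytes[start:start + BYTES_PER_LINE]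
--         hex_vals = ", ".join(f"${b:02X}" for b in chunk)
--         if start + BYTES_PER_LINE >= n:
--             lines.append(f"    {hex_vals}")
--         else:
--             lines.append(f"    {hex_vals},")
--
--     lines.append("  );")
--     return "\n".join(lines) + "\n"
-- ===== SOURCE B (Python) =====
-- def format_bytes_as_pascal(name, data_bytes):
--     """Format a byte array as a Pascal typed constant."""
--     if not data_bytes:
--         return f"  {name}_Data: array[0..0] of Byte = (0);\n"
--     tokens = [f"${b:02X}" for b in data_bytes]
--     last = len(tokens) - 1
--     body = "".join(
--         tok + ("" if i == last else ",\n    " if (i + 1) % 16 == 0 else ", ")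
--         for i, tok in enumerate(tokens)
--     )
--     return f"  {name}_Data: array[0..{last}] of Byte = (\n    " + body + "\n  );\n"
-- ===== Notes on version B (the rewrite author's own statement) =====
-- stated objective: alternative
-- what changed: A slices the byte list into 16-byte chunks, formats each chunk into a line and joins the lines; B makes one flat pass over per-byte hex tokens, choosing each token's separator from its position ('' at the end, ',\n ' at a 16 boundary, ', ' otherwise), with no chunk lists or line list ever built.
import Mathlib
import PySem

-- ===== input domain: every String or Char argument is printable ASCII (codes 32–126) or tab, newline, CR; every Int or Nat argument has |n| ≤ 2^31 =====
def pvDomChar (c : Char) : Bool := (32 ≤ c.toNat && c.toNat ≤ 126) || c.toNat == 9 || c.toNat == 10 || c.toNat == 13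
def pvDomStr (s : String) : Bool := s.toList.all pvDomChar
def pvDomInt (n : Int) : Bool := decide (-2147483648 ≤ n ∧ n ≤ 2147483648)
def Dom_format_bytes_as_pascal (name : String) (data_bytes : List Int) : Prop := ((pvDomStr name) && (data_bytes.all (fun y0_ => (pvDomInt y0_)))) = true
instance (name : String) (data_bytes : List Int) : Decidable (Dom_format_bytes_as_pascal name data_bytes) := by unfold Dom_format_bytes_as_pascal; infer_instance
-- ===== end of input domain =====

-- B re-decomposes A's chunk-by-16-and-join construction into one flat pass over per-byte
-- tokens with a position-chosen separator (objective: alternative decomposition, same cost).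

-- shared token formatter: Python f"${b:02X}" (uppercase hex, zero-padded to width 2, '-' sign first)
def pvHexDigit (n : Nat) : Char := if n < 10 then Char.ofNat (48 + n) else Char.ofNat (55 + n)

def pvHexChars (n : Nat) : List Char :=
  if _h : n < 16 then [pvHexDigit n]
  else pvHexChars (n / 16) ++ [pvHexDigit (n % 16)]
decreasing_by exact Nat.div_lt_self (by omega) (by norm_num)

def pvFmt02X (b : Int) : String :=
  if b < 0 then "-" ++ String.ofList (pvHexChars (-b).toNat)   -- width 2 incl. sign: digits padded to 1, a no-op
  else
    let ds := pvHexChars b.toNat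
    String.ofList (if ds.length < 2 then '0' :: ds else ds)

def pvTok (b : Int) : String := "$" ++ pvFmt02X b

-- ===== PORT A =====
def format_bytes_as_pascal (name : String) (data_bytes : List Int) : String :=
  if data_bytes = [] then
    "  " ++ name ++ "_Data: array[0..0] of Byte = (0);\n"
  else
    let n : Int := data_bytes.length
    let lines : List String :=
      ["  " ++ name ++ "_Data: array[0.." ++ PySem.Int.toStr (n - 1) ++ "] of Byte = ("]
    let lines := (PySem.List.pyRange 0 n 16).foldl (fun lines start =>
      let chunk := PySem.List.slice data_bytes (some start) (some (start + 16))
      let hex_vals := PySem.Str.join ", " (chunk.map pvTok)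
      if start + 16 ≥ n then lines ++ ["    " ++ hex_vals]
      else lines ++ ["    " ++ hex_vals ++ ","]) lines
    PySem.Str.join "\n" (lines ++ ["  );"]) ++ "\n"

-- ===== PORT B =====
def format_bytes_as_pascal_alt (name : String) (data_bytes : List Int) : String :=
  if data_bytes = [] then
    "  " ++ name ++ "_Data: array[0..0] of Byte = (0);\n"
  else
    let tokens := data_bytes.map pvTok
    let last : Int := (tokens.length : Int) - 1
    let body := PySem.Str.join "" ((PySem.List.enumerate tokens).map fun it =>
      it.2 ++ (if it.1 = last then "" else if (it.1 + 1) % 16 = 0 then ",\n    " else ", "))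
    "  " ++ name ++ "_Data: array[0.." ++ PySem.Int.toStr last ++ "] of Byte = (\n    "
      ++ body ++ "\n  );\n"

-- ===== PRECONDITION & SPEC =====
def Spec_format_bytes_as_pascal (name : String) (data_bytes : List Int) (out : String) : Prop := out = format_bytes_as_pascal_alt name data_bytes
instance (name : String) (data_bytes : List Int) (out : String) : Decidable (Spec_format_bytes_as_pascal name data_bytes out) := by unfold Spec_format_bytes_as_pascal; infer_instance

-- ===== CLAIM (what is proved, stated in full; the proofs are below) =====
def Claim_equal_format_bytes_as_pascal : Prop := ∀ (name : String) (data_bytes : List Int), Dom_format_bytes_as_pascal name data_bytes → Spec_format_bytes_as_pascal name data_bytes (format_bytes_as_pascal name data_bytes)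

-- ===== LEMMAS AND PROOFS =====

-- A's per-chunk lines, as a structural recursion on the token list
def pvChunks (ts : List String) : List String :=
  if ts.length ≤ 16 then ["    " ++ PySem.Str.join ", " ts]
  else ("    " ++ PySem.Str.join ", " (ts.take 16) ++ ",") :: pvChunks (ts.drop 16)
termination_by ts.length
decreasing_by simp; omega

-- B's flat walk with position-chosen separators (L = total number of tokens)
def pvWalk (L : Int) : Int → List String → String
  | _, [] => ""
  | i, t :: ts =>
      t ++ (if i + 1 = L then "" else if (i + 1) % 16 = 0 then ",\n    " else ", ") ++ pvWalk L (i + 1) ts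

lemma pvJoin_singleton (s a : String) : PySem.Str.join s [a] = a := by
  simp [PySem.Str.join, PySem.Chars.join_singleton]

lemma pvWalk_cons (L i : Int) (t : String) (ts : List String) :
    pvWalk L i (t :: ts) =
      t ++ (if i + 1 = L then "" else if (i + 1) % 16 = 0 then ",\n    " else ", ") ++ pvWalk L (i + 1) ts := rfl

lemma pvChunks_ne (ts : List String) : pvChunks ts ≠ [] := by
  unfold pvChunks; split <;> simp

lemma pvJoin_cons₂ (s a : String) (l : List String) (h : l ≠ []) :
    PySem.Str.join s (a :: l) = a ++ s ++ PySem.Str.join s l := by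
  cases l with
  | nil => exact absurd rfl h
  | cons b u => simp [PySem.Str.join, PySem.Chars.join_cons_cons, String.append_assoc]

lemma pvJoin_empty_cons (a : String) (l : List String) :
    PySem.Str.join "" (a :: l) = a ++ PySem.Str.join "" l := by
  cases l with
  | nil => simp [PySem.Str.join, PySem.Chars.join_singleton, PySem.Chars.join_nil]
  | cons b u => simp [PySem.Str.join, PySem.Chars.join_cons_cons]

lemma pvJoin_append₂ (s : String) (l₁ l₂ : List String) (h₁ : l₁ ≠ []) (h₂ : l₂ ≠ []) :
    PySem.Str.join s (l₁ ++ l₂) = PySem.Str.join s l₁ ++ s ++ PySem.Str.join s l₂ := by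
  induction l₁ with
  | nil => exact absurd rfl h₁
  | cons a t ih =>
    cases t with
    | nil => rw [show ([a] : List String) ++ l₂ = a :: l₂ from rfl, pvJoin_cons₂ s a l₂ h₂, pvJoin_singleton]
    | cons b u =>
      rw [List.cons_append, pvJoin_cons₂ s a _ (by simp),
          pvJoin_cons₂ s a _ (by simp), ih (by simp)]
      simp [String.append_assoc]

lemma pvRange16_cons (a b : Int) (h : a < b) :
    PySem.List.pyRange a b 16 = a :: PySem.List.pyRange (a + 16) b 16 := by
  rw [PySem.List.pyRange_of_pos _ _ (show (0:Int) < 16 by norm_num),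
      PySem.List.pyRange_of_pos _ _ (show (0:Int) < 16 by norm_num)]
  have hcnt : ((b - a + 16 - 1) / 16).toNat
      = (if a + 16 < b then ((b - (a + 16) + 16 - 1) / 16).toNat else 0) + 1 := by
    split <;> omega
  rw [if_pos h, hcnt, List.range_succ_eq_map, List.map_cons, List.map_map]
  congr 1
  · omega
  · apply List.map_congr_left
    intro k _
    simp [Function.comp]
    ring

lemma pvRange16_nil (a b : Int) (h : b ≤ a) : PySem.List.pyRange a b 16 = [] := by
  rw [PySem.List.pyRange_of_pos _ _ (by norm_num)]
  simp [if_neg (not_lt.2 h)]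

-- within-chunk walk: only ", " separators, "" after the final token
lemma pvWalk_last_chunk (ts : List String) : ∀ (i L : Int), ts ≠ [] → i + ts.length = L →
    (∀ j : Int, i < j → j < L → ¬ ((16:Int) ∣ j)) →
    pvWalk L i ts = PySem.Str.join ", " ts := by
  induction ts with
  | nil => intro i L h; exact absurd rfl h
  | cons t rest ih =>
    intro i L _ hlen hno
    have hlen' : i + (rest.length : Int) + 1 = L := by
      push_cast [List.length_cons] at hlen; omega
    cases rest with
    | nil =>
      rw [pvWalk_cons, if_pos (by simp at hlen'; omega), pvJoin_singleton]
      show t ++ "" ++ pvWalk L (i+1) [] = t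
      simp [pvWalk]
    | cons b u =>
      rw [pvWalk_cons, pvJoin_cons₂ _ _ _ (by simp),
          ih (i+1) L (by simp)
            (by push_cast [List.length_cons] at hlen' ⊢; omega)
            (fun j h1 h2 => hno j (by omega) h2)]
      have h1 : ¬ (i + 1 = L) := by push_cast [List.length_cons] at hlen'; omega
      have h2 : ¬ ((i + 1) % 16 = 0) := by
        intro hmod
        exact hno (i+1) (by omega)
          (by push_cast [List.length_cons] at hlen'; omega) (by omega)
      rw [if_neg h1, if_neg h2]

-- crossing a 16-boundary that is not the end: ",\n    " there
lemma pvWalk_chunk_step (xs : List String) : ∀ (ys : List String) (i L : Int), xs ≠ [] →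
    (∀ j : Int, i < j → j < i + xs.length → ¬ ((16:Int) ∣ j)) →
    ((16:Int) ∣ (i + xs.length)) → i + (xs.length : Int) < L →
    pvWalk L i (xs ++ ys) =
      PySem.Str.join ", " xs ++ ",\n    " ++ pvWalk L (i + xs.length) ys := by
  induction xs with
  | nil => intro ys i L h; exact absurd rfl h
  | cons t rest ih =>
    intro ys i L _ hno hdvd hlt
    have hL : i + ((t :: rest).length : Int) = i + rest.length + 1 := by
      push_cast [List.length_cons]; ring
    rw [hL] at hdvd hlt ⊢
    have hno' : ∀ j : Int, i < j → j < i + rest.length + 1 → ¬ ((16:Int) ∣ j) :=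
      fun j h1 h2 => hno j h1 (by rw [hL]; omega)
    cases rest with
    | nil =>
      rw [List.cons_append, List.nil_append, pvWalk_cons, pvJoin_singleton]
      have h1 : ¬ (i + 1 = L) := by simp at hlt; omega
      have h2 : (i + 1) % 16 = 0 := by simp at hdvd; omega
      rw [if_neg h1, if_pos h2]
      simp
    | cons b u =>
      rw [List.cons_append, pvWalk_cons, pvJoin_cons₂ _ _ _ (by simp)]
      have h1 : ¬ (i + 1 = L) := by push_cast [List.length_cons] at hlt; omega
      have h2 : ¬ ((i + 1) % 16 = 0) := by
        intro hmod
        exact hno' (i+1) (by omega) (by push_cast [List.length_cons]; omega) (by omega)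
      have hih := ih ys (i+1) L (by simp)
        (fun j ha hb => hno' j (by omega) (by push_cast [List.length_cons] at hb ⊢; omega))
        (by push_cast [List.length_cons] at hdvd ⊢; omega)
        (by push_cast [List.length_cons] at hlt ⊢; omega)
      rw [if_neg h1, if_neg h2, hih]
      have h3 : i + 1 + ((b :: u).length : Int) = i + (b :: u).length + 1 := by
        push_cast [List.length_cons]; ring
      rw [h3]
      simp [String.append_assoc]

-- the chunked lines joined by newlines equal the flat walk
lemma pvCore (ts : List String) : ∀ (off : Nat), ts ≠ [] → 16 ∣ off →
    PySem.Str.join "\n" (pvChunks ts) = "    " ++ pvWalk ((off : Int) + ts.length) off ts := by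
  induction ts using pvChunks.induct with
  | case1 ts hle =>
    intro off hne hdvd
    rw [pvChunks, if_pos hle, pvJoin_singleton,
        pvWalk_last_chunk ts off (off + ts.length) hne rfl
          (fun j h1 h2 hd => by
            obtain ⟨c, hc⟩ := hd
            obtain ⟨d, hdd⟩ := hdvd
            omega)]
  | case2 ts hgt ih =>
    intro off hne hdvd
    have hdrop : ts.drop 16 ≠ [] := by
      intro h
      have := congrArg List.length h
      simp at this; omega
    have hdvd16 : 16 ∣ (off + 16) := by omega
    have hlen16 : (ts.take 16).length = 16 := by simp; omega
    have hdlen : (ts.drop 16).length = ts.length - 16 := by simp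
    set L : Int := (off : Int) + ts.length with hLdef
    rw [pvChunks, if_neg hgt, pvJoin_cons₂ _ _ _ (pvChunks_ne _), ih (off + 16) hdrop hdvd16]
    have hL2 : ((off + 16 : Nat) : Int) + ((ts.drop 16).length : Int) = L := by
      rw [hLdef, hdlen, Nat.cast_sub (by omega)]
      push_cast; ring
    rw [hL2]
    have hstep := pvWalk_chunk_step (ts.take 16) (ts.drop 16) off L
      (by intro h; have := congrArg List.length h; rw [hlen16] at this; simp at this)
      (fun j h1 h2 hd => by
        rw [hlen16] at h2
        obtain ⟨c, hc⟩ := hd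
        obtain ⟨d, hdd⟩ := hdvd
        omega)
      (by rw [hlen16]; obtain ⟨d, hdd⟩ := hdvd; omega)
      (by rw [hlen16, hLdef]; push_cast; omega)
    rw [hlen16] at hstep
    have hc16 : ((off : Int) + ((16 : Nat) : Int)) = ((off + 16 : Nat) : Int) := by push_cast; ring
    rw [hc16] at hstep
    have hsplit : ts = ts.take 16 ++ ts.drop 16 := (List.take_append_drop 16 ts).symm
    conv_rhs => rw [hsplit]
    rw [hstep]
    have hlit : (",\n    " : String) = "," ++ "\n" ++ "    " := rfl
    rw [hlit]
    simp [String.append_assoc]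
    rw [← String.append_assoc, show ((",\n" : String) ++ "    ") = ",\n    " from rfl]

-- A's foldl over range(0,n,16) builds exactly the chunk lines
lemma pvFoldA (db : List Int) : ∀ (k m : Nat) (acc : List String),
    db.length - m ≤ k → m < db.length →
    (PySem.List.pyRange (m : Int) (db.length : Int) 16).foldl (fun lines start =>
      let chunk := PySem.List.slice db (some start) (some (start + 16))
      let hex_vals := PySem.Str.join ", " (chunk.map pvTok)
      if start + 16 ≥ (db.length : Int) then lines ++ ["    " ++ hex_vals]
      else lines ++ ["    " ++ hex_vals ++ ","]) acc
    = acc ++ pvChunks ((db.drop m).map pvTok) := by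
  intro k
  induction k with
  | zero => intro m acc hk hm; omega
  | succ k ih =>
    intro m acc hk hm
    rw [pvRange16_cons _ _ (by exact_mod_cast hm), List.foldl_cons]
    have hslice : PySem.List.slice db (some (m : Int)) (some ((m : Int) + 16))
        = (db.drop m).take 16 := by
      rw [show ((m : Int) + 16) = ((m + 16 : Nat) : Int) from by push_cast; ring,
          PySem.List.slice_toNat db (by positivity) (by positivity)]
      simp
      omega
    have hmap : ((db.drop m).take 16).map pvTok = ((db.drop m).map pvTok).take 16 := by
      rw [List.map_take]
    by_cases hend : (m : Int) + 16 ≥ (db.length : Int)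
    · simp only [hslice, hmap, if_pos hend]
      rw [show ((m : Int) + 16) = ((m + 16 : Nat) : Int) from by push_cast; ring,
          pvRange16_nil _ _ (by exact_mod_cast hend), List.foldl_nil]
      have hlen : ((db.drop m).map pvTok).length ≤ 16 := by
        simp; omega
      rw [pvChunks, if_pos hlen, List.take_of_length_le hlen]
    · simp only [hslice, hmap, if_neg hend]
      rw [show ((m : Int) + 16) = ((m + 16 : Nat) : Int) from by push_cast; ring,
          ih (m + 16) _ (by omega) (by omega)]
      have hlen : ¬ ((db.drop m).map pvTok).length ≤ 16 := by
        simp; omega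
      conv_rhs => rw [pvChunks]
      rw [if_neg hlen]
      have hdd : ((db.drop m).map pvTok).drop 16 = (db.drop (m + 16)).map pvTok := by
        rw [← List.map_drop, List.drop_drop]
      rw [hdd]
      simp

-- B's enumerate-join is the flat walk
lemma pvJoinEnum (ts : List String) : ∀ (i last : Int),
    PySem.Str.join "" ((PySem.List.enumerate ts i).map fun it =>
      it.2 ++ (if it.1 = last then "" else if (it.1 + 1) % 16 = 0 then ",\n    " else ", "))
    = pvWalk (last + 1) i ts := by
  induction ts with
  | nil => intro i last; simp [PySem.List.enumerate, pvWalk, PySem.Str.join, PySem.Chars.join_nil]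
  | cons t rest ih =>
    intro i last
    rw [PySem.List.enumerate_cons, List.map_cons, pvJoin_empty_cons, ih, pvWalk_cons]
    by_cases h : i = last
    · rw [if_pos h, if_pos (by omega)]
    · rw [if_neg h, if_neg (show ¬ (i + 1 = last + 1) by omega)]

-- ===== VERDICT (by name: the statement is the Claim_ definition above) =====
theorem format_bytes_as_pascal_spec : Claim_equal_format_bytes_as_pascal := by
  intro name db _
  unfold Spec_format_bytes_as_pascal format_bytes_as_pascal format_bytes_as_pascal_alt
  by_cases h : db = []
  · rw [if_pos h, if_pos h]
  · rw [if_neg h, if_neg h]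
    simp only []
    have hpos : 0 < db.length := List.length_pos_of_ne_nil h
    set hdr : String :=
      "  " ++ name ++ "_Data: array[0.." ++ PySem.Int.toStr ((db.length : Int) - 1) ++ "] of Byte = (" with hhdr
    have hA := pvFoldA db db.length 0 [hdr] (by omega) hpos
    rw [Nat.cast_zero, List.drop_zero] at hA
    have htoksne : db.map pvTok ≠ [] := by simp [h]
    have hcore := pvCore (db.map pvTok) 0 htoksne (by omega)
    rw [Nat.cast_zero, zero_add] at hcore
    have henum := pvJoinEnum (db.map pvTok) 0 (((db.map pvTok).length : Int) - 1)
    rw [show (((db.map pvTok).length : Int) - 1 + 1) = ((db.map pvTok).length : Int) by ring] at henum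
    rw [hA, henum, List.append_assoc, List.singleton_append, pvJoin_cons₂ _ _ _ (by simp),
        pvJoin_append₂ _ _ _ (pvChunks_ne _) (by simp), pvJoin_singleton, hcore]
    rw [show ((db.map pvTok).length : Int) = (db.length : Int) by simp]
    rw [show ("] of Byte = (\n    " : String) = "] of Byte = (" ++ "\n" ++ "    " from rfl,
        show ("\n  );\n" : String) = "\n" ++ "  );" ++ "\n" from rfl, hhdr]
    simp [String.append_assoc]
    rw [← String.append_assoc,
        show (("] of Byte = (\n" : String) ++ "    ") = "] of Byte = (\n    " from rfl]
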